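-- pv_equiv track=rewrite | github.com/BlurryFaceL/spendulon | aws-infra/src/handlers/pdf/parseBankStatement.py | _group_hdfc_descriptions
-- ===== SOURCE A (Python) =====
-- def _group_hdfc_descriptions(description_lines, transaction_count):
--     """Group HDFC description lines into proper transactions"""
--     if not description_lines:
--         return [''] * transaction_count
--
--     # HDFC pattern analysis: look for transaction start indicators
--     transaction_starts = ['UPI-', 'REV-', 'CC0006', 'NEFT-', 'IMPS-', 'ACH-']
--
--     grouped = []
--     current_group = []
--
--     for line in description_lines:
--         # Check if this line starts a new transaction
--         is_transaction_start = any(line.startswith(start) for start in transaction_starts)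
--
--         if is_transaction_start and current_group:
--             # Save previous group and start new one
--             grouped.append(' | '.join(current_group))
--             current_group = [line]
--         else:
--             # Add to current group
--             current_group.append(line)
--
--     # Add the last group
--     if current_group:
--         grouped.append(' | '.join(current_group))
--
--     # Ensure we have exactly transaction_count descriptions
--     while len(grouped) < transaction_count:
--         grouped.append('')
--
--     return grouped[:transaction_count]
-- ===== SOURCE B (Python) =====
-- def _group_hdfc_descriptions(description_lines, transaction_count):
--     """Group HDFC description lines into transactions by a single backward pass."""
--     if not description_lines:
--         return [''] * transaction_count
--     prefixes = ('UPI-', 'REV-', 'CC0006', 'NEFT-', 'IMPS-', 'ACH-')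
--     first = description_lines[0]
--     grouped = []
--     seg = []
--     for line in reversed(description_lines[1:]):
--         seg.append(line)
--         if line.startswith(prefixes):
--             grouped.append(' | '.join(reversed(seg)))
--             seg = []
--     grouped.append(' | '.join([first] + list(reversed(seg))))
--     grouped.reverse()
--     grouped += [''] * (transaction_count - len(grouped))
--     return grouped[:transaction_count]
-- ===== Notes on version B (the rewrite author's own statement) =====
-- stated objective: alternative
-- what changed: Replaces A's forward flush-on-match state machine (accumulate a current group, emit it when the next transaction-start line appears, flush the remainder at the end) with a single backward pass over the tail that closes a group exactly when it meets a transaction-start line and builds the output back-to-front, with arithmetic padding instead of a while loop.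
import Mathlib
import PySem

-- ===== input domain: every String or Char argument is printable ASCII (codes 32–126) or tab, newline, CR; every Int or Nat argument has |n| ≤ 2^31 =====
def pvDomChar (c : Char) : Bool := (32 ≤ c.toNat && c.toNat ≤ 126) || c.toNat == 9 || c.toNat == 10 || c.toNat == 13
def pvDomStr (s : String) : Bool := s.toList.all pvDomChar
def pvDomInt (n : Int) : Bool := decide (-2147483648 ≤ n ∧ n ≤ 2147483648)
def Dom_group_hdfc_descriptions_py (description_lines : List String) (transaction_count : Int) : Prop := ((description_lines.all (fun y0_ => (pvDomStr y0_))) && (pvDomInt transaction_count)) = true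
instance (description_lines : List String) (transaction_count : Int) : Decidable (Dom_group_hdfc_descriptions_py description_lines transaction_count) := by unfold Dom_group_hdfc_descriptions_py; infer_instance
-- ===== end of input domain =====

-- B replaces A's forward flush-on-match state machine by a single backward pass that closes a
-- group whenever it meets a transaction-start line (objective: alternative, same cost).

-- ===== PORT A =====
def hdfcStarts : List String := ["UPI-", "REV-", "CC0006", "NEFT-", "IMPS-", "ACH-"]

-- loop body of A: state = (grouped, current_group)
def hdfcStepA (st : List String × List String) (line : String) : List String × List String :=
  let isStart := hdfcStarts.any (fun s => PySem.Str.startswith line s)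
  if isStart && !st.2.isEmpty then
    (st.1 ++ [PySem.Str.join " | " st.2], [line])
  else
    (st.1, st.2 ++ [line])

-- A's final `while len(grouped) < transaction_count: grouped.append('')`
def hdfcWhilePad (g : List String) (tc : Int) : List String :=
  if (g.length : Int) < tc then hdfcWhilePad (g ++ [""]) tc else g
termination_by (tc - g.length).toNat
decreasing_by simp; omega

def group_hdfc_descriptions_py (description_lines : List String) (transaction_count : Int) : List String :=
  if description_lines.isEmpty then PySem.List.pyRepeat [""] transaction_count
  else
    let st := description_lines.foldl hdfcStepA ([], [])
    let grouped := if !st.2.isEmpty then st.1 ++ [PySem.Str.join " | " st.2] else st.1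
    PySem.List.slice (hdfcWhilePad grouped transaction_count) none (some transaction_count)

-- ===== PORT B =====
-- B's str.startswith(prefixes) on the 6-tuple
def hdfcIsStart (line : String) : Bool :=
  PySem.Str.startswith line "UPI-" || PySem.Str.startswith line "REV-" ||
  PySem.Str.startswith line "CC0006" || PySem.Str.startswith line "NEFT-" ||
  PySem.Str.startswith line "IMPS-" || PySem.Str.startswith line "ACH-"

-- loop body of B's backward pass: state = (grouped, seg), both built back-to-front
def hdfcStepB (st : List String × List String) (line : String) : List String × List String :=
  let seg := st.2 ++ [line]
  if hdfcIsStart line then (st.1 ++ [PySem.Str.join " | " seg.reverse], [])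
  else (st.1, seg)

def group_hdfc_descriptions_py_alt (description_lines : List String) (transaction_count : Int) : List String :=
  match description_lines with
  | [] => PySem.List.pyRepeat [""] transaction_count
  | first :: rest =>
    let st := rest.reverse.foldl hdfcStepB ([], [])
    let grouped := (st.1 ++ [PySem.Str.join " | " (first :: st.2.reverse)]).reverse
    let grouped := grouped ++ PySem.List.pyRepeat [""] (transaction_count - grouped.length)
    PySem.List.slice grouped none (some transaction_count)

-- ===== PRECONDITION & SPEC =====
def Spec_group_hdfc_descriptions_py (description_lines : List String) (transaction_count : Int) (out : List String) : Prop := out = group_hdfc_descriptions_py_alt description_lines transaction_count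
instance (description_lines : List String) (transaction_count : Int) (out : List String) : Decidable (Spec_group_hdfc_descriptions_py description_lines transaction_count out) := by unfold Spec_group_hdfc_descriptions_py; infer_instance

-- ===== CLAIM (what is proved, stated in full; the proofs are below) =====
def Claim_equal_group_hdfc_descriptions_py : Prop := ∀ (description_lines : List String) (transaction_count : Int), Dom_group_hdfc_descriptions_py description_lines transaction_count → Spec_group_hdfc_descriptions_py description_lines transaction_count (group_hdfc_descriptions_py description_lines transaction_count)

-- ===== LEMMAS AND PROOFS =====

-- common recursive characterisation of grouping (proof-side only)
def hdfcRec (cur : List String) : List String → List String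
  | [] => [PySem.Str.join " | " cur]
  | h :: t =>
    if hdfcIsStart h then PySem.Str.join " | " cur :: hdfcRec [h] t
    else hdfcRec (cur ++ [h]) t

lemma hdfcAny_eq (line : String) :
    hdfcStarts.any (fun s => PySem.Str.startswith line s) = hdfcIsStart line := by
  simp [hdfcStarts, hdfcIsStart, Bool.or_assoc]

lemma loopA (l : List String) : ∀ (g c : List String), c ≠ [] →
    (l.foldl hdfcStepA (g, c)).2 ≠ [] ∧
    (l.foldl hdfcStepA (g, c)).1 ++ [PySem.Str.join " | " (l.foldl hdfcStepA (g, c)).2]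
      = g ++ hdfcRec c l := by
  induction l with
  | nil => intro g c hc; exact ⟨hc, rfl⟩
  | cons h t ih =>
    intro g c hc
    have hne : c.isEmpty = false := by simpa [List.isEmpty_iff] using hc
    by_cases hs : hdfcIsStart h
    · have hstep : hdfcStepA (g, c) h = (g ++ [PySem.Str.join " | " c], [h]) := by
        unfold hdfcStepA; rw [hdfcAny_eq]; simp [hs, hne]
      have := ih (g ++ [PySem.Str.join " | " c]) [h] (by simp)
      simp only [List.foldl_cons, hstep]
      exact ⟨this.1, by rw [this.2]; simp [hdfcRec, hs]⟩
    · have hstep : hdfcStepA (g, c) h = (g, c ++ [h]) := by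
        unfold hdfcStepA; rw [hdfcAny_eq]; simp [hs]
      have := ih g (c ++ [h]) (by simp)
      simp only [List.foldl_cons, hstep]
      exact ⟨this.1, by rw [this.2]; simp [hdfcRec, hs]⟩

lemma loopB (rest : List String) : ∀ (cur : List String),
    ((rest.reverse.foldl hdfcStepB ([], [])).1
      ++ [PySem.Str.join " | " (cur ++ (rest.reverse.foldl hdfcStepB ([], [])).2.reverse)]).reverse
      = hdfcRec cur rest := by
  induction rest with
  | nil => intro cur; simp [hdfcRec]
  | cons h t ih =>
    intro cur
    have hfold : (h :: t).reverse.foldl hdfcStepB ([], [])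
        = hdfcStepB (t.reverse.foldl hdfcStepB ([], [])) h := by
      simp [List.foldl_append]
    by_cases hs : hdfcIsStart h
    · simp only [hfold, hdfcStepB, hs, if_pos, hdfcRec]
      rw [← ih [h]]
      simp
    · simp only [hfold, hdfcStepB, hs, hdfcRec, Bool.false_eq_true]
      rw [← ih (cur ++ [h])]
      simp

lemma whilePad_eq (g : List String) (tc : Int) :
    hdfcWhilePad g tc = g ++ PySem.List.pyRepeat [""] (tc - g.length) := by
  suffices H : ∀ (n : Nat) (g : List String), (tc - (g.length : Int)).toNat = n →
      hdfcWhilePad g tc = g ++ PySem.List.pyRepeat [""] (tc - g.length) from H _ g rfl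
  intro n
  induction n with
  | zero =>
    intro g hg
    have hlt : ¬ (g.length : Int) < tc := by omega
    rw [hdfcWhilePad, if_neg hlt]
    simp [PySem.List.pyRepeat_singleton, hg]
  | succ n ih =>
    intro g hg
    have hlt : (g.length : Int) < tc := by omega
    rw [hdfcWhilePad, if_pos hlt, ih (g ++ [""]) (by simp; omega)]
    simp only [PySem.List.pyRepeat_singleton, List.append_assoc, List.singleton_append,
      List.length_append, List.length_singleton]
    congr 1
    have h1 : (tc - (g.length : Int)).toNat = (tc - ((g.length : Int) + 1)).toNat + 1 := by omega
    rw [h1, List.replicate_succ]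
    push_cast
    ring_nf

-- ===== VERDICT (by name: the statement is the Claim_ definition above) =====
theorem group_hdfc_descriptions_py_spec : Claim_equal_group_hdfc_descriptions_py := by
  intro ls tc _
  unfold Spec_group_hdfc_descriptions_py
  match ls with
  | [] => rfl
  | first :: rest =>
    unfold group_hdfc_descriptions_py group_hdfc_descriptions_py_alt
    simp only [List.isEmpty_cons, Bool.false_eq_true, List.foldl_cons]
    have hstep0 : hdfcStepA ([], []) first = ([], [first]) := by
      simp [hdfcStepA]
    rw [hstep0]
    obtain ⟨h2, hgr⟩ := loopA rest [] [first] (by simp)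
    have hne : (rest.foldl hdfcStepA ([], [first])).2.isEmpty = false := by
      simpa [List.isEmpty_iff] using h2
    have hB := loopB rest [first]
    simp only [hne, Bool.not_false, if_pos, hgr, List.nil_append]
    rw [whilePad_eq, ← hB]
    simp
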